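-- pv_equiv track=rewrite | github.com/mdmurphy822/Ed4All | Trainforge/generators/violation_generator.py | _extract_first_violation_reason
-- ===== SOURCE A (Python) =====
-- from typing import Any, Dict, List, Optional, Tuple
--
-- def _extract_first_violation_reason(msg: str) -> str:
--     """Pluck the first violation block from pyshacl's report message.
--
--     pyshacl's textual report is multi-line; the first
--     "Constraint Violation" block carries the most actionable signal.
--     Truncated to keep the SFT completion under the 600-char schema cap
--     once shape TTL is appended.
--     """
--     if not msg:
--         return "Graph fails the shape."
--     lines = msg.splitlines()
--     keep: List[str] = []
--     capture = False
--     for line in lines: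
--         if "Constraint Violation" in line:
--             capture = True
--         if capture:
--             if not line.strip():
--                 if keep:
--                     break
--                 continue
--             keep.append(line.strip())
--             if len(keep) >= 4:
--                 break
--     if not keep:
--         return msg.strip().splitlines()[0][:160]
--     # Trim hard so the shape TTL still fits in the completion.
--     return " | ".join(keep)[:240]
-- ===== SOURCE B (Python) =====
-- from typing import List, Optional
--
-- def _extract_first_violation_reason(msg: str) -> str:
--     """Simpler decomposition: locate the first 'Constraint Violation' line,
--     then take the stripped lines of that block declaratively (up to the first
--     blank line, at most 4), instead of a single stateful capture-flag loop."""
--     if not msg: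
--         return "Graph fails the shape."
--     lines = msg.splitlines()
--     idx = next((i for i, l in enumerate(lines) if "Constraint Violation" in l), None)
--     if idx is None:
--         return msg.strip().splitlines()[0][:160]
--     tail = [l.strip() for l in lines[idx:]]
--     stop = tail.index("") if "" in tail else len(tail)
--     return " | ".join(tail[:min(stop, 4)])[:240]
-- ===== Notes on version B (the rewrite author's own statement) =====
-- stated objective: simpler
-- what changed: Replaces the single stateful capture-flag loop (with its dead blank-line continue branch) by a find-the-index step plus a declarative strip/cut-at-first-blank/take-4 slice of the block.
import Mathlib
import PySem

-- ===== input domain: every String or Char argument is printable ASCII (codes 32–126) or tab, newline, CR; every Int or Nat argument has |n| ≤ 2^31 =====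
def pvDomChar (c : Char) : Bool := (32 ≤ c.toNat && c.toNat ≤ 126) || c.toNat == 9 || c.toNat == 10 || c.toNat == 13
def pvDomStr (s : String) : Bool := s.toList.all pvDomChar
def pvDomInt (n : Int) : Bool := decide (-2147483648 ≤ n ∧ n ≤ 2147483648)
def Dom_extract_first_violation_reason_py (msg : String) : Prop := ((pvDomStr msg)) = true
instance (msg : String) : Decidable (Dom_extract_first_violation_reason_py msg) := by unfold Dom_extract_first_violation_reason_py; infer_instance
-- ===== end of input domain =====

-- B replaces A's stateful capture-flag loop by find-first-index + a declarative cut of the block (simpler decomposition, same cost).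

-- ===== PORT A =====
-- the 'for line in lines' loop, state (keep, capture); break is modelled by returning keep
def pvLoopA : List String → List String → Bool → List String
  | [], keep, _ => keep
  | line :: rest, keep, capture =>
    let capture := capture || PySem.Str.isIn "Constraint Violation" line
    if capture then
      if PySem.Str.strip line = "" then
        (if keep = [] then pvLoopA rest keep capture else keep)   -- 'if keep: break' / 'continue'
      else
        let keep := keep ++ [PySem.Str.strip line]
        if 4 ≤ keep.length then keep else pvLoopA rest keep capture
    else pvLoopA rest keep capture

def extract_first_violation_reason_py (msg : String) : String :=
  if msg = "" then "Graph fails the shape."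
  else
    let lines := PySem.Str.splitlines msg
    let keep := pvLoopA lines [] false
    if keep = [] then
      match PySem.List.pyGet? (PySem.Str.splitlines (PySem.Str.strip msg)) 0 with
      | some l0 => PySem.Str.slice l0 none (some 160)
      | none => ""   -- Python raises IndexError here (whitespace-only msg); excluded by Pre_
    else
      PySem.Str.slice (PySem.Str.join " | " keep) none (some 240)

-- ===== PORT B =====
def extract_first_violation_reason_py_alt (msg : String) : String :=
  if msg = "" then "Graph fails the shape."
  else
    let lines := PySem.Str.splitlines msg
    match lines.findIdx? (fun l => PySem.Str.isIn "Constraint Violation" l) with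
    | none =>
      match PySem.List.pyGet? (PySem.Str.splitlines (PySem.Str.strip msg)) 0 with
      | some l0 => PySem.Str.slice l0 none (some 160)
      | none => ""   -- Python raises IndexError here; excluded by Pre_
    | some idx =>
      -- lines[idx:] with idx a found (natural) index is List.drop idx (PySem.List.slice_from_natCast)
      let tail := (lines.drop idx).map PySem.Str.strip
      let stop := (PySem.List.index? tail "").getD tail.length
      PySem.Str.slice (PySem.Str.join " | " (tail.take (min stop 4))) none (some 240)

-- ===== PRECONDITION & SPEC =====
-- Pre_ excludes exactly the non-empty whitespace-only messages, on which A (and B) raise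
-- IndexError at msg.strip().splitlines()[0].
def Pre_extract_first_violation_reason_py (msg : String) : Prop :=
  msg = "" ∨ PySem.Str.strip msg ≠ ""
instance (msg : String) : Decidable (Pre_extract_first_violation_reason_py msg) := by
  unfold Pre_extract_first_violation_reason_py; infer_instance

def pvWitness_extract_first_violation_reason_py : String := "Constraint Violation x"

def Spec_extract_first_violation_reason_py (msg : String) (out : String) : Prop :=
  out = extract_first_violation_reason_py_alt msg
instance (msg : String) (out : String) : Decidable (Spec_extract_first_violation_reason_py msg out) := by
  unfold Spec_extract_first_violation_reason_py; infer_instance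

-- ===== CLAIM (what is proved, stated in full; the proofs are below) =====
def Claim_equal_extract_first_violation_reason_py : Prop :=
  ∀ (msg : String), Dom_extract_first_violation_reason_py msg →
    Pre_extract_first_violation_reason_py msg →
    Spec_extract_first_violation_reason_py msg (extract_first_violation_reason_py msg)

-- ===== LEMMAS AND PROOFS =====

-- B's collection of the block, as a function of the line list (proof helper)
def pvCollect (ls : List String) : List String :=
  match ls.findIdx? (fun l => PySem.Str.isIn "Constraint Violation" l) with
  | none => []
  | some i =>
    let tail := (ls.drop i).map PySem.Str.strip
    tail.take (min ((PySem.List.index? tail "").getD tail.length) 4)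

-- A's keep once capture is on, with b lines of budget left (proof helper)
def pvGather : List String → Nat → List String
  | [], _ => []
  | l :: ls, b =>
    if PySem.Str.strip l = "" then []
    else if b ≤ 1 then [PySem.Str.strip l] else PySem.Str.strip l :: pvGather ls (b - 1)

lemma strip_ne_nil_of_mem {s : List Char} {c : Char} (hc : c ∈ s)
    (hsp : PySem.Chars.isspace c = false) : PySem.Chars.strip s ≠ [] := by
  intro h
  have hall : ∀ x ∈ PySem.Chars.lstrip s, PySem.Chars.isspace x := by
    have : List.dropWhile PySem.Chars.isspace (PySem.Chars.lstrip s).reverse = [] := by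
      simpa [PySem.Chars.strip, PySem.Chars.rstrip] using h
    intro x hx
    have := List.dropWhile_eq_nil_iff.mp this x (by simpa using hx)
    simpa using this
  have hall' : ∀ x ∈ s, PySem.Chars.isspace x = true := by
    intro x hx
    rw [← List.takeWhile_append_dropWhile (p := PySem.Chars.isspace) (l := s)] at hx
    rcases List.mem_append.mp hx with h1 | h2
    · exact List.mem_takeWhile_imp h1
    · exact hall x h2
  have := hall' c hc
  simp [hsp] at this

lemma strip_ne_empty_of_cv {l : String}
    (h : PySem.Str.isIn "Constraint Violation" l = true) : PySem.Str.strip l ≠ "" := by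
  have hinf : ("Constraint Violation").toList <:+: l.toList :=
    (PySem.Chars.isIn_iff_infix ("Constraint Violation").toList l.toList).mp h
  have hC : 'C' ∈ l.toList := hinf.subset (by decide)
  have hne : PySem.Chars.strip l.toList ≠ [] :=
    strip_ne_nil_of_mem hC (by decide)
  intro he
  have : (PySem.Str.strip l).toList = [] := by rw [he]; rfl
  rw [PySem.Str.toList_strip] at this
  exact hne this

lemma pvGather_eq_takeWhile : ∀ (ls : List String) (b : Nat), 1 ≤ b →
    pvGather ls b = ((ls.map PySem.Str.strip).takeWhile (fun s => !(s == ""))).take b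
  | [], b, _ => by simp [pvGather]
  | l :: ls, b, hb => by
    by_cases h : PySem.Str.strip l = ""
    · simp [pvGather, h]
    · by_cases hb1 : b ≤ 1
      · have : b = 1 := by omega
        subst this
        simp [pvGather, h]
      · have ih := pvGather_eq_takeWhile ls (b - 1) (by omega)
        have hb' : b = (b - 1) + 1 := by omega
        simp [pvGather, h, hb1, ih]
        rw [hb']
        simp

lemma pvLoopA_capture : ∀ (ls keep : List String) (b : Nat), keep ≠ [] →
    keep.length + b = 4 → 1 ≤ b →
    pvLoopA ls keep true = keep ++ pvGather ls b
  | [], keep, b, _, _, _ => by simp [pvLoopA, pvGather]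
  | l :: ls, keep, b, hne, hlen, hb => by
    by_cases h : PySem.Str.strip l = ""
    · simp [pvLoopA, pvGather, h, hne]
    · by_cases hb1 : b ≤ 1
      · have h4 : 4 ≤ (keep ++ [PySem.Str.strip l]).length := by
          simp; omega
        simp [pvLoopA, pvGather, h, hb1]
        intro hc; omega
      · have h4 : ¬ 4 ≤ (keep ++ [PySem.Str.strip l]).length := by
          simp; omega
        have ih := pvLoopA_capture ls (keep ++ [PySem.Str.strip l]) (b - 1)
          (by simp) (by simp; omega) (by omega)
        simp [pvLoopA, pvGather, h, hb1, ih]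
        intro hc; omega

lemma take_min_idxOf? : ∀ (xs : List String) (n : Nat),
    xs.take (min ((List.idxOf? "" xs).getD xs.length) n)
      = (xs.takeWhile (fun s => !(s == ""))).take n
  | [], n => by simp
  | x :: xs, n => by
    by_cases h : x = ""
    · subst h
      have h0 : List.idxOf? "" ("" :: xs) = some 0 := by
        simp [List.idxOf?, List.findIdx?_cons]
      simp [h0]
    · have hc : List.idxOf? "" (x :: xs) = (List.idxOf? "" xs).map (· + 1) := by
        simp [List.idxOf?, List.findIdx?_cons, h]
      have hstep : ((List.idxOf? "" (x :: xs)).getD (x :: xs).length)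
          = ((List.idxOf? "" xs).getD xs.length) + 1 := by
        rw [hc]; cases List.idxOf? "" xs <;> simp
      cases n with
      | zero => simp
      | succ m =>
        have ih := take_min_idxOf? xs m
        rw [hstep]
        simp [h, Nat.succ_min_succ, ih]

lemma take_min_index? (xs : List String) (n : Nat) :
    xs.take (min ((PySem.List.index? xs "").getD xs.length) n)
      = (xs.takeWhile (fun s => !(s == ""))).take n := by
  rw [PySem.List.index?_eq_idxOf?]
  exact take_min_idxOf? xs n

lemma pvLoopA_eq_pvCollect : ∀ (ls : List String),
    pvLoopA ls [] false = pvCollect ls ∧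
    (∀ i, ls.findIdx? (fun l => PySem.Str.isIn "Constraint Violation" l) = some i →
      ∃ hd tl, (ls.drop i).map PySem.Str.strip = hd :: tl ∧ hd ≠ "")
  | [] => by constructor
             · simp [pvLoopA, pvCollect]
             · intro i hi; simp at hi
  | l :: ls => by
    obtain ⟨ih1, ih2⟩ := pvLoopA_eq_pvCollect ls
    by_cases hp : PySem.Str.isIn "Constraint Violation" l = true
    · have hs : PySem.Str.strip l ≠ "" := strip_ne_empty_of_cv hp
      have hp2 : PySem.Chars.isIn ("Constraint Violation").toList l.toList = true := hp
      simp at hp2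
      have hidx : (l :: ls).findIdx? (fun l => PySem.Str.isIn "Constraint Violation" l)
          = some 0 := by simp [List.findIdx?_cons, hp2]
      constructor
      · have hloop : pvLoopA (l :: ls) [] false
            = [PySem.Str.strip l] ++ pvGather ls 3 := by
          have := pvLoopA_capture ls [PySem.Str.strip l] 3 (by simp) (by simp) (by omega)
          simp [pvLoopA, hp2, hs, this]
        rw [hloop, pvCollect, hidx]
        simp only [List.drop_zero, List.map_cons]
        rw [take_min_index?]
        simp [hs, pvGather_eq_takeWhile ls 3 (by omega)]
      · intro i hi
        rw [hidx] at hi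
        injection hi with hi; subst hi
        exact ⟨PySem.Str.strip l, ls.map PySem.Str.strip, by simp, hs⟩
    · have hp' : PySem.Str.isIn "Constraint Violation" l = false := by
        simpa using hp
      have hp2 : PySem.Chars.isIn ("Constraint Violation").toList l.toList = false := hp'
      simp at hp2
      have hidx : (l :: ls).findIdx? (fun l => PySem.Str.isIn "Constraint Violation" l)
          = ((ls.findIdx? (fun l => PySem.Str.isIn "Constraint Violation" l)).map (· + 1)) := by
        simp [List.findIdx?_cons, hp2]
      constructor
      · have hloop : pvLoopA (l :: ls) [] false = pvLoopA ls [] false := by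
          simp [pvLoopA, hp2]
        rw [hloop, ih1, pvCollect, pvCollect, hidx]
        cases ls.findIdx? (fun l => PySem.Str.isIn "Constraint Violation" l) <;> simp
      · intro i hi
        rw [hidx] at hi
        cases hcase : ls.findIdx? (fun l => PySem.Str.isIn "Constraint Violation" l) with
        | none => rw [hcase] at hi; simp at hi
        | some j =>
          rw [hcase] at hi
          simp at hi; subst hi
          simpa using ih2 j hcase

-- ===== VERDICT (by name: the statement is the Claim_ definition above) =====
set_option maxHeartbeats 2000000 in
theorem extract_first_violation_reason_py_spec : Claim_equal_extract_first_violation_reason_py := by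
  intro msg _ _
  unfold Spec_extract_first_violation_reason_py
  unfold extract_first_violation_reason_py extract_first_violation_reason_py_alt
  by_cases hmsg : msg = ""
  · subst hmsg; rfl
  · rw [if_neg hmsg, if_neg hmsg]
    obtain ⟨h1, h2⟩ := pvLoopA_eq_pvCollect (PySem.Str.splitlines msg)
    cases hidx : (PySem.Str.splitlines msg).findIdx? (fun l => PySem.Str.isIn "Constraint Violation" l) with
    | none =>
      have hk : pvLoopA (PySem.Str.splitlines msg) [] false = [] := by
        rw [h1, pvCollect, hidx]
      simp only [hk, hidx]
      rfl
    | some i =>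
      obtain ⟨hd, tl, htail, hhd⟩ := h2 i hidx
      have hkeep : pvLoopA (PySem.Str.splitlines msg) [] false
          = (((PySem.Str.splitlines msg).drop i).map PySem.Str.strip).take
              (min ((PySem.List.index? (((PySem.Str.splitlines msg).drop i).map PySem.Str.strip) "").getD
                (((PySem.Str.splitlines msg).drop i).map PySem.Str.strip).length) 4) := by
        rw [h1, pvCollect, hidx]
      have hne : pvLoopA (PySem.Str.splitlines msg) [] false ≠ [] := by
        rw [hkeep, htail]
        rw [PySem.List.index?_eq_idxOf?]
        have : List.idxOf? "" (hd :: tl) = (List.idxOf? "" tl).map (· + 1) := by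
          simp [List.idxOf?, List.findIdx?_cons, hhd]
        rw [this]
        cases List.idxOf? "" tl <;> simp
      simp only [hidx]
      rw [if_neg hne, hkeep]
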